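-- pv_equiv track=rewrite | github.com/tigerjack/isd-quantum | experiments/test_permutation_recursion.py | _get_required_ancilla_for_permutation
-- ===== SOURCE A (Python) =====
-- from math import ceil, log
--
-- def _get_required_ancilla_for_permutation(n, w):
--     #TODO if w > n/2, use (w - n/2) and negation
--     steps = ceil(log(n, 2))
--     n_power2 = 2**steps
--     max_swaps_per_step = int(n_power2 / 2)
--     # swaps required at first steps is equal to weight
--     swaps_per_step_i = w
--     swaps_pattern = [w]
--     for i in range(steps - 1):
--         swaps_per_step_i = min(swaps_per_step_i * 2, max_swaps_per_step)
--         swaps_pattern.append(swaps_per_step_i)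
--     return n_power2, swaps_pattern
-- ===== SOURCE B (Python) =====
-- def _get_required_ancilla_for_permutation(n, w):
--     # find the enclosing power of two by doubling (no floating-point log)
--     n_power2, steps = 1, 0
--     while n_power2 < n:
--         n_power2 *= 2
--         steps += 1
--     cap = n_power2 // 2
--     # later steps whose doubled swap count stays below the cap, then a constant tail
--     grow = [w * 2 ** i for i in range(1, steps) if w * 2 ** i < cap]
--     return n_power2, [w] + grow + [cap] * (steps - 1 - len(grow))
-- ===== Notes on version B (the rewrite author's own statement) =====
-- stated objective: alternative
-- what changed: B finds the enclosing power of two by an integer doubling loop instead of float ceil(log(n,2)), and builds the pattern as a staged concatenation: a geometric prefix of the step counts that stay below the cap plus a constant [cap]*k tail, instead of threading a double-and-clamp accumulator.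
-- intended difference: For n = 2**29 and n = 2**31 (the only such inputs in the domain), float rounding in ceil(log(n,2)) makes A use one step too many, so A returns a doubled n_power2 and a pattern with one extra entry; B counts steps exactly with integer doubling and returns the intended power of two and pattern. — e.g. on _get_required_ancilla_for_permutation(536870912, 0): A returns (1073741824, [0,0,0,0,0,0,0,0,0,0,0,0,0,0,0,0,0,0,0,0,0,0,0,0,0,0,0,0,0,0]), B returns (536870912, [0,0,0,0,0,0,0,0,0,0,0,0,0,0,0,0,0,0,0,0,0,0,0,0,0,0,0,0,0])
import Mathlib
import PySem

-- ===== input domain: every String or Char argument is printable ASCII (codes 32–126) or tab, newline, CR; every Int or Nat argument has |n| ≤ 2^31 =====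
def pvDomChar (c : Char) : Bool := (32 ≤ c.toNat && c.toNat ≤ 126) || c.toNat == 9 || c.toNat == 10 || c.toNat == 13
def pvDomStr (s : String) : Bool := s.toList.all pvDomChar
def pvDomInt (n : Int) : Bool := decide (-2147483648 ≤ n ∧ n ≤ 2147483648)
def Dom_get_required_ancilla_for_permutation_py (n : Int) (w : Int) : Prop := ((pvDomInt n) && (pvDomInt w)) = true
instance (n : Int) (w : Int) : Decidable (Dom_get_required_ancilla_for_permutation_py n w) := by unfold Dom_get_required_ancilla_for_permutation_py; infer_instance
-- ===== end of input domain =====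

-- B finds the enclosing power of two by an integer doubling loop instead of float
-- ceil(log(n,2)) and builds the pattern as a geometric below-cap prefix plus a constant
-- [cap]*k tail instead of threading a double-and-clamp accumulator.

-- ===== PORT A =====
-- Exact integer model of math.ceil(math.log(n, 2)) for 1 ≤ n ≤ 2^31: pvLogLoop counts
-- the doublings of 1 needed to reach n (= exact ceil of log2 n; fuel 64 suffices on the
-- whole domain), EXCEPT that float rounding of log makes the Python result one larger
-- exactly at n = 2^29 and n = 2^31 (verified exhaustively over all powers of two in the
-- domain; non-powers are far enough from integers for float rounding to matter).
def pvLogLoop (fuel : Nat) (n p : Int) : Nat :=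
  match fuel with
  | 0 => 0
  | fuel + 1 => if p < n then pvLogLoop fuel n (p * 2) + 1 else 0

def pvCeilLogFloat (n : Int) : Int :=
  (pvLogLoop 64 n 1 : Int) + (if n = 536870912 ∨ n = 2147483648 then 1 else 0)

def get_required_ancilla_for_permutation_py (n : Int) (w : Int) : Int × List Int :=
  let steps := pvCeilLogFloat n
  let n_power2 : Int := 2 ^ steps.toNat          -- 2**steps (steps ≥ 0 whenever n ≥ 1)
  let max_swaps_per_step := n_power2 / 2         -- int(n_power2 / 2): exact, n_power2 ≤ 2^32 is float-exact
  let st := (PySem.List.pyRange 0 (steps - 1) 1).foldl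
      (fun (st : List Int × Int) _ =>
        let s := min (st.2 * 2) max_swaps_per_step
        (st.1 ++ [s], s)) ([w], w)
  (n_power2, st.1)

-- ===== PORT B =====
-- the while loop of Source B: doubles p until p ≥ n, returning (p, steps); fuel 64 only
-- makes the recursion total and is never exhausted on the domain (|n| ≤ 2^31)
def pvGrowLoop (fuel : Nat) (n p : Int) (steps : Nat) : Int × Nat :=
  match fuel with
  | 0 => (p, steps)
  | fuel + 1 => if p < n then pvGrowLoop fuel n (p * 2) (steps + 1) else (p, steps)

def get_required_ancilla_for_permutation_py_alt (n : Int) (w : Int) : Int × List Int :=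
  let st := pvGrowLoop 64 n 1 0
  let n_power2 := st.1
  let steps := st.2
  let cap := n_power2 / 2                        -- n_power2 // 2
  let grow := ((PySem.List.pyRange 1 (steps : Int) 1).filter
      (fun i => w * 2 ^ i.toNat < cap)).map (fun i => w * 2 ^ i.toNat)
  (n_power2, ([w] ++ grow) ++ List.replicate ((steps : Int) - 1 - grow.length).toNat cap)

-- ===== PRECONDITION & SPEC =====
-- Pre_ excludes exactly n ≤ 0, where math.log raises ValueError in A.
def Pre_get_required_ancilla_for_permutation_py (n : Int) (w : Int) : Prop := 1 ≤ n
instance (n : Int) (w : Int) : Decidable (Pre_get_required_ancilla_for_permutation_py n w) := by unfold Pre_get_required_ancilla_for_permutation_py; infer_instance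
def pvWitness_get_required_ancilla_for_permutation_py : Int × Int := (6, 2)

-- For n = 2^29 and n = 2^31 (the only such inputs in the domain), float rounding in
-- ceil(log(n,2)) makes A use one step too many, so A returns a doubled n_power2 and a
-- pattern with one extra entry; B counts steps exactly with integer doubling and returns
-- the intended power of two and pattern.
def D_get_required_ancilla_for_permutation_py (n : Int) (w : Int) : Prop :=
  n = 536870912 ∨ n = 2147483648
instance (n : Int) (w : Int) : Decidable (D_get_required_ancilla_for_permutation_py n w) := by unfold D_get_required_ancilla_for_permutation_py; infer_instance

def Spec_get_required_ancilla_for_permutation_py (n : Int) (w : Int) (out : Int × List Int) : Prop := ¬ D_get_required_ancilla_for_permutation_py n w → out = get_required_ancilla_for_permutation_py_alt n w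
instance (n : Int) (w : Int) (out : Int × List Int) : Decidable (Spec_get_required_ancilla_for_permutation_py n w out) := by unfold Spec_get_required_ancilla_for_permutation_py; infer_instance

def pvDiffWitness_get_required_ancilla_for_permutation_py : Int × Int := (536870912, 0)
def pvDiffWitnessOut_get_required_ancilla_for_permutation_py : (Int × List Int) × (Int × List Int) :=
  ((1073741824, [0,0,0,0,0,0,0,0,0,0,0,0,0,0,0,0,0,0,0,0,0,0,0,0,0,0,0,0,0,0]),
   (536870912, [0,0,0,0,0,0,0,0,0,0,0,0,0,0,0,0,0,0,0,0,0,0,0,0,0,0,0,0,0]))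

-- ===== CLAIM (what is proved, stated in full; the proofs are below) =====
def Claim_unchanged_get_required_ancilla_for_permutation_py : Prop := ∀ (n : Int) (w : Int), Dom_get_required_ancilla_for_permutation_py n w → Pre_get_required_ancilla_for_permutation_py n w → Spec_get_required_ancilla_for_permutation_py n w (get_required_ancilla_for_permutation_py n w)
def Claim_changed_get_required_ancilla_for_permutation_py : Prop := Dom_get_required_ancilla_for_permutation_py (pvDiffWitness_get_required_ancilla_for_permutation_py.1) (pvDiffWitness_get_required_ancilla_for_permutation_py.2) ∧ Pre_get_required_ancilla_for_permutation_py (pvDiffWitness_get_required_ancilla_for_permutation_py.1) (pvDiffWitness_get_required_ancilla_for_permutation_py.2) ∧ D_get_required_ancilla_for_permutation_py (pvDiffWitness_get_required_ancilla_for_permutation_py.1) (pvDiffWitness_get_required_ancilla_for_permutation_py.2) ∧ get_required_ancilla_for_permutation_py (pvDiffWitness_get_required_ancilla_for_permutation_py.1) (pvDiffWitness_get_required_ancilla_for_permutation_py.2) = pvDiffWitnessOut_get_required_ancilla_for_permutation_py.1 ∧ get_required_ancilla_for_permutation_py_alt (pvDiffWitness_get_required_ancilla_for_permutation_py.1) (pvDiffWitness_get_required_ancilla_for_permutation_py.2)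 = pvDiffWitnessOut_get_required_ancilla_for_permutation_py.2 ∧ pvDiffWitnessOut_get_required_ancilla_for_permutation_py.1 ≠ pvDiffWitnessOut_get_required_ancilla_for_permutation_py.2
def Claim_exact_get_required_ancilla_for_permutation_py : Prop := ∀ (n : Int) (w : Int), Dom_get_required_ancilla_for_permutation_py n w → Pre_get_required_ancilla_for_permutation_py n w → D_get_required_ancilla_for_permutation_py n w → get_required_ancilla_for_permutation_py n w ≠ get_required_ancilla_for_permutation_py_alt n w

-- ===== LEMMAS AND PROOFS =====

-- B's while loop in terms of A's step counter
theorem pv_grow_eq (fuel : Nat) (n p : Int) (s : Nat) :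
    pvGrowLoop fuel n p s = (p * 2 ^ pvLogLoop fuel n p, s + pvLogLoop fuel n p) := by
  induction fuel generalizing p s with
  | zero => simp [pvGrowLoop, pvLogLoop]
  | succ fuel ih =>
    simp only [pvGrowLoop, pvLogLoop]
    split_ifs with h
    · rw [ih]; refine Prod.ext ?_ ?_ <;> simp <;> ring
    · simp

-- doubling then capping a capped value = capping the doubled value
theorem pv_min_double (x M : Int) (hM : 0 ≤ M) :
    min (min x M * 2) M = min (x * 2) M := by
  simp only [min_def]; split_ifs <;> omega

-- closed form of A's accumulator loop
theorem pv_loop (w M : Int) (hM : 0 ≤ M) (m : Nat) :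
    ((PySem.List.pyRange 0 (m : Int) 1).foldl
      (fun (st : List Int × Int) _ =>
        let s := min (st.2 * 2) M
        (st.1 ++ [s], s)) ([w], w))
    = (w :: (List.range m).map (fun j => min (w * 2 ^ (j + 1)) M),
       if m = 0 then w else min (w * 2 ^ m) M) := by
  induction m with
  | zero => simp [PySem.List.pyRange_one_eq_nil]
  | succ m ih =>
    rw [show ((m + 1 : Nat) : Int) = (m : Int) + 1 by push_cast; ring,
        PySem.List.pyRange_one_succ_right (by positivity), List.foldl_append, ih]
    simp only [List.foldl_cons, List.foldl_nil, List.range_succ, List.map_append, List.map_cons,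
      List.map_nil, List.cons_append]
    by_cases hm : m = 0
    · subst hm; simp
    · have h2 : min (min (w * 2 ^ m) M * 2) M = min (w * 2 ^ (m + 1)) M := by
        rw [pv_min_double _ _ hM]; ring_nf
      simp [hm, h2]

-- the below-cap predicate is downward closed in the exponent
theorem pv_mono (w M : Int) (hM : 0 ≤ M) (i j : Nat) (hij : i ≤ j)
    (h : w * 2 ^ j < M) : w * 2 ^ i < M := by
  by_cases hw : 0 ≤ w
  · have h2 : (2 : Int) ^ i ≤ 2 ^ j := pow_le_pow_right₀ (by norm_num) hij
    nlinarith
  · have h2 : (0 : Int) < 2 ^ i := by positivity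
    nlinarith

-- B's staged construction (below-cap prefix ++ constant tail) equals A's per-element clamp
theorem pv_tail (w M : Int) (hM : 0 ≤ M) (m : Nat) :
    ((List.range m).filter (fun t => w * 2 ^ (t + 1) < M)).map (fun t => w * 2 ^ (t + 1))
      ++ List.replicate (m - ((List.range m).filter (fun t => w * 2 ^ (t + 1) < M)).length) M
    = (List.range m).map (fun t => min (w * 2 ^ (t + 1)) M) := by
  induction m with
  | zero => simp
  | succ m ih =>
    rw [List.range_succ]
    simp only [List.filter_append, List.map_append, List.length_append]
    by_cases h : w * 2 ^ (m + 1) < M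
    · have hall : ∀ t ∈ List.range m, decide (w * 2 ^ (t + 1) < M) = true := by
        intro t ht
        simp only [List.mem_range] at ht
        simpa using pv_mono w M hM (t + 1) (m + 1) (by omega) h
      rw [List.filter_eq_self.mpr hall]
      simp only [List.filter_cons, decide_eq_true_eq, if_pos h, List.filter_nil,
        List.length_range, List.length_cons, List.length_nil, Nat.sub_self,
        List.replicate_zero, List.append_nil, List.map_cons, List.map_nil]
      congr 1
      · refine (List.map_congr_left ?_).symm
        intro t ht
        simp only [List.mem_range] at ht
        exact min_eq_left (le_of_lt (pv_mono w M hM (t + 1) (m + 1) (by omega) h))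
      · simp [min_eq_left (le_of_lt h)]
    · simp only [List.filter_cons, decide_eq_true_eq, if_neg h, List.filter_nil,
        List.length_nil, List.map_nil, List.append_nil, List.map_cons, Nat.add_zero]
      have hlen : ((List.range m).filter (fun t => w * 2 ^ (t + 1) < M)).length ≤ m := by
        calc _ ≤ (List.range m).length := List.length_filter_le _ _
          _ = m := by simp
      rw [show m + 1 - ((List.range m).filter (fun t => w * 2 ^ (t + 1) < M)).length
            = (m - ((List.range m).filter (fun t => w * 2 ^ (t + 1) < M)).length) + 1
          by omega,
        List.replicate_succ', ← List.append_assoc, ih]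
      simp [min_eq_right (by omega : M ≤ w * 2 ^ (m + 1))]

-- the two ports agree for every n ≥ 1 outside the float corner
theorem pv_agree (n w : Int)
    (hD : ¬ D_get_required_ancilla_for_permutation_py n w) :
    get_required_ancilla_for_permutation_py n w = get_required_ancilla_for_permutation_py_alt n w := by
  have hceil : pvCeilLogFloat n = (pvLogLoop 64 n 1 : Int) := by
    unfold pvCeilLogFloat
    rw [if_neg (by unfold D_get_required_ancilla_for_permutation_py at hD; exact hD)]
    ring
  simp only [get_required_ancilla_for_permutation_py, get_required_ancilla_for_permutation_py_alt,
    hceil, pv_grow_eq, one_mul, Nat.zero_add, Int.toNat_natCast]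
  set k : Nat := pvLogLoop 64 n 1 with hk
  set M : Int := 2 ^ k / 2 with hM
  have hM0 : 0 ≤ M := by positivity
  refine Prod.ext rfl ?_
  cases k with
  | zero =>
    simp [PySem.List.pyRange_one_eq_nil]
  | succ j =>
    have hrange : ((j + 1 : Nat) : Int) - 1 = (j : Nat) := by push_cast; ring
    rw [hrange, pv_loop w M hM0 j]
    simp only
    rw [PySem.List.pyRange_one (1 : Int) ((j + 1 : Nat) : Int)]
    have hlen : (((j + 1 : Nat) : Int) - 1).toNat = j := by omega
    rw [hlen, List.filter_map, List.map_map]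
    have hfun : ((fun i : Int => w * 2 ^ i.toNat) ∘ fun t : Nat => (1 : Int) + t)
        = fun t : Nat => w * 2 ^ (t + 1) := by
      funext t
      simp only [Function.comp]
      rw [show ((1 : Int) + (t : Int)).toNat = t + 1 by omega]
    have hpred : ((fun i : Int => decide (w * 2 ^ i.toNat < M)) ∘ fun t : Nat => (1 : Int) + t)
        = fun t : Nat => decide (w * 2 ^ (t + 1) < M) := by
      funext t
      simp only [Function.comp]
      rw [show ((1 : Int) + (t : Int)).toNat = t + 1 by omega]
    rw [hfun, hpred]
    simp only [List.length_map]
    have hflen : ((List.range j).filter (fun t => w * 2 ^ (t + 1) < M)).length ≤ j := by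
      calc _ ≤ (List.range j).length := List.length_filter_le _ _
        _ = j := by simp
    have hcount : ((j : Int)
          - (((List.range j).filter (fun t => w * 2 ^ (t + 1) < M)).length : Int)).toNat
        = j - ((List.range j).filter (fun t => w * 2 ^ (t + 1) < M)).length := by
      omega
    rw [hcount, ← pv_tail w M hM0 j]
    simp [List.cons_append]

-- ===== VERDICT (by name: the statement is the Claim_ definition above) =====
theorem get_required_ancilla_for_permutation_py_spec : Claim_unchanged_get_required_ancilla_for_permutation_py := by
  intro n w _ _ hD
  exact pv_agree n w hD

theorem get_required_ancilla_for_permutation_py_changed : Claim_changed_get_required_ancilla_for_permutation_py := by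
  unfold Claim_changed_get_required_ancilla_for_permutation_py; decide

theorem get_required_ancilla_for_permutation_py_tight : Claim_exact_get_required_ancilla_for_permutation_py := by
  intro n w _ _ hD heq
  have h1 := congrArg Prod.fst heq
  rcases hD with h | h <;> subst h
  · have hA : (get_required_ancilla_for_permutation_py 536870912 w).1 = 1073741824 := rfl
    have hB : (get_required_ancilla_for_permutation_py_alt 536870912 w).1 = 536870912 := rfl
    rw [hA, hB] at h1; exact absurd h1 (by decide)
  · have hA : (get_required_ancilla_for_permutation_py 2147483648 w).1 = 4294967296 := rfl
    have hB : (get_required_ancilla_for_permutation_py_alt 2147483648 w).1 = 2147483648 := rfl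
    rw [hA, hB] at h1; exact absurd h1 (by decide)
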